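-- pv_equiv track=rewrite | github.com/KeithChamberlain/Tweet-Sentiment-and-Music-Genere | src/music_genre.py | strip_all_entities
-- ===== SOURCE A (Python) =====
-- import string
--
-- def strip_all_entities(text):
--     '''
--     Via https://stackoverflow.com/questions/8376691/
--         how-to-remove-hashtag-user-link-of-a-tweet-using-regular-expression
--     '''
--     entity_prefixes = ['@','#',"'"]
--     for separator in  string.punctuation:
--         if separator not in entity_prefixes :
--             text = text.replace(separator,' ')
--     words = []
--     for word in text.split():
--         word = word.strip()
--         if word:
--             if word[0] not in entity_prefixes:
--                 words.append(word)
--     return ' '.join(words)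
-- ===== SOURCE B (Python) =====
-- import string
--
-- def strip_all_entities(text):
--     keep = {'@', '#', "'"}
--     seps = set(string.punctuation) - keep
--     words = []
--     cur = []
--     for ch in text + ' ':
--         if ch in seps or ch.isspace():
--             if cur:
--                 if cur[0] not in keep:
--                     words.append(''.join(cur))
--                 cur = []
--         else:
--             cur.append(ch)
--     return ' '.join(words)
-- ===== Notes on version B (the rewrite author's own statement) =====
-- stated objective: alternative
-- what changed: Replaces A's ~29 sequential full-string replace passes followed by split/strip/filter with a single character-level scan that builds the filtered words directly in one pass.
import Mathlib
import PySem

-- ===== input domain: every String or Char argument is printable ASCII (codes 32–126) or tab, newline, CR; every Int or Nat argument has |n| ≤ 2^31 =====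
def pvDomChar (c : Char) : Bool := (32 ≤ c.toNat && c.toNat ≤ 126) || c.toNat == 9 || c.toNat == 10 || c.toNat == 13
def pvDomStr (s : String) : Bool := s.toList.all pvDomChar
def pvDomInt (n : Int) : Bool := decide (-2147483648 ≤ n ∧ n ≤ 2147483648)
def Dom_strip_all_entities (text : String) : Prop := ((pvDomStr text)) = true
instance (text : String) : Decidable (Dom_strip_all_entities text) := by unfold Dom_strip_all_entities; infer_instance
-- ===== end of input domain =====

-- B replaces A's ~29 sequential full-string replace passes + split/strip/filter with one
-- character-level scan that builds the filtered words directly (return value equivalence).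

-- ===== PORT A =====
-- string.punctuation
def pvPunctuation : List Char :=
  ['!','"','#','$','%','&','\'','(',')','*','+',',','-','.','/',':',';','<','=','>','?','@','[','\\',']','^','_','`','{','|','}','~']

-- entity_prefixes = ['@','#',"'"] (one-character strings, modelled at the character level)
def pvEntityPrefixes : List Char := ['@', '#', '\'']

def strip_all_entities (text : String) : String :=
  -- for separator in string.punctuation: if separator not in entity_prefixes: text = text.replace(separator,' ')
  let t := pvPunctuation.foldl (fun t sep =>
    if sep ∈ pvEntityPrefixes then t else PySem.Str.replace t (String.ofList [sep]) " ") text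
  -- for word in text.split(): word = word.strip(); if word: if word[0] not in entity_prefixes: words.append(word)
  let words := (PySem.Str.split₀ t).foldl (fun ws word =>
    let word := PySem.Str.strip word
    if word ≠ "" then
      if ((PySem.Str.pyGet? word 0).getD ' ') ∉ pvEntityPrefixes then ws ++ [word] else ws
    else ws) []
  PySem.Str.join " " words

-- ===== PORT B =====
def pvKeep : PySem.Set Char := PySem.Set.ofList ['@', '#', '\'']

def pvSeps : PySem.Set Char := PySem.Set.diff (PySem.Set.ofList pvPunctuation) pvKeep

-- the single pass: flush cur at separators, keeping words whose first char is not in pvKeep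
def pvScanB : List Char → List Char → List String → List String
  | [], _cur, words => words
  | ch :: rest, cur, words =>
    if PySem.Set.contains pvSeps ch || PySem.Chars.isspace ch then
      match cur with
      | [] => pvScanB rest [] words
      | c0 :: _ => pvScanB rest []
          (if PySem.Set.contains pvKeep c0 then words else words ++ [String.ofList cur])
    else pvScanB rest (cur ++ [ch]) words

def strip_all_entities_alt (text : String) : String :=
  PySem.Str.join " " (pvScanB (text.toList ++ [' ']) [] [])

-- ===== PRECONDITION & SPEC =====
def Spec_strip_all_entities (text : String) (out : String) : Prop := out = strip_all_entities_alt text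
instance (text : String) (out : String) : Decidable (Spec_strip_all_entities text out) := by unfold Spec_strip_all_entities; infer_instance

-- ===== CLAIM (what is proved, stated in full; the proofs are below) =====
def Claim_equal_strip_all_entities : Prop := ∀ (text : String), Dom_strip_all_entities text → Spec_strip_all_entities text (strip_all_entities text)

-- ===== LEMMAS AND PROOFS =====

-- the punctuation characters A actually replaces
def pvDrop : List Char := pvPunctuation.filter (fun c => decide (c ∉ pvEntityPrefixes))

-- the single-character substitution all of A's replace passes amount to
def pvF (c : Char) : Char := if c ∈ pvDrop then ' ' else c

-- word-boundary test shared by both characterizations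
def pvSep (c : Char) : Bool := decide (c ∈ pvDrop) || PySem.Chars.isspace c

-- reference tokenizer: words of l (pending prefix cur), split at pvSep characters
def pvToks : List Char → List Char → List (List Char)
  | [], cur => if cur = [] then [] else [cur]
  | c :: rest, cur =>
    if pvSep c then (if cur = [] then pvToks rest [] else cur :: pvToks rest []) else pvToks rest (cur ++ [c])

def pvOk (w : List Char) : Bool := match w with | [] => true | c :: _ => decide (c ∉ pvEntityPrefixes)

lemma pvSeps_eq : pvSeps = pvDrop := by decide

lemma pvKeep_eq : pvKeep = pvEntityPrefixes := by decide

lemma isspace_pvF (c : Char) : PySem.Chars.isspace (pvF c) = pvSep c := by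
  unfold pvF pvSep
  by_cases h : c ∈ pvDrop
  · simp [h]; decide
  · simp [h]

-- single-character replace is map
lemma replace_go_single (a b : Char) :
    ∀ (l : List Char) (fuel : Nat) (acc : List Char), l.length ≤ fuel →
      PySem.Chars.replace.go [a] [b] fuel l acc
        = acc.reverse ++ l.map (fun c => if c = a then b else c) := by
  intro l
  induction l with
  | nil =>
    intro fuel acc _
    cases fuel <;> simp [PySem.Chars.replace.go]
  | cons c t ih =>
    intro fuel acc hf
    cases fuel with
    | zero => simp at hf
    | succ fuel =>
      simp only [List.length_cons, Nat.add_le_add_iff_right] at hf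
      by_cases h : a = c
      · subst h
        simp [PySem.Chars.replace.go, List.isPrefixOf, ih fuel _ hf]
      · simp [PySem.Chars.replace.go, List.isPrefixOf, Ne.symm h, ih fuel _ hf,
          (by simpa using (bne_iff_ne (a := a) (b := c)).mpr h : (a == c) = false)]

lemma replace_single (a b : Char) (l : List Char) :
    PySem.Chars.replace l [a] [b] = l.map (fun c => if c = a then b else c) := by
  simp [PySem.Chars.replace, replace_go_single a b l l.length [] (le_refl _)]

-- A's replace loop is one map
lemma foldP (P E : List Char) (l : List Char) :
    P.foldl (fun t q => if q ∈ E then t else t.map (fun c => if c = q then ' ' else c)) l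
      = l.map (fun c => if c ∈ P ∧ c ∉ E then ' ' else c) := by
  induction P generalizing l with
  | nil => simp
  | cons q P ih =>
    simp only [List.foldl_cons]
    by_cases hq : q ∈ E
    · rw [if_pos hq, ih]
      apply List.map_congr_left
      intro c _
      by_cases hc : c = q
      · subst hc; simp [hq]
      · simp [List.mem_cons, hc]
    · rw [if_neg hq, ih, List.map_map]
      apply List.map_congr_left
      intro c _
      by_cases hc : c = q
      · subst hc; simp [hq, Function.comp]
      · by_cases hcP : c ∈ P ∧ c ∉ E <;> simp [Function.comp, hc, hcP, List.mem_cons]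

lemma strFold (t : String) :
    (pvPunctuation.foldl (fun t sep =>
        if sep ∈ pvEntityPrefixes then t else PySem.Str.replace t (String.ofList [sep]) " ") t).toList
      = t.toList.map pvF := by
  have step : ∀ (P : List Char) (t : String),
      (P.foldl (fun t sep =>
        if sep ∈ pvEntityPrefixes then t else PySem.Str.replace t (String.ofList [sep]) " ") t).toList
      = P.foldl (fun l q => if q ∈ pvEntityPrefixes then l
          else l.map (fun c => if c = q then ' ' else c)) t.toList := by
    intro P
    induction P with
    | nil => intro t; rfl
    | cons q P ih =>
      intro t
      simp only [List.foldl_cons]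
      by_cases hq : q ∈ pvEntityPrefixes
      · rw [if_pos hq, if_pos hq, ih]
      · rw [if_neg hq, if_neg hq, ih]
        congr 1
        simp [PySem.Str.replace, replace_single]
  rw [step, foldP]
  apply List.map_congr_left
  intro c _
  unfold pvF pvDrop
  by_cases h : c ∈ pvPunctuation ∧ c ∉ pvEntityPrefixes <;> simp [h, List.mem_filter]

-- split₀ of the pvF-mapped characters is the reference tokenizer
lemma split_go_toks : ∀ (l cur : List Char) (acc : List (List Char)),
    PySem.Chars.split₀.go (l.map pvF) cur.reverse acc = acc.reverse ++ pvToks l cur := by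
  intro l
  induction l with
  | nil =>
    intro cur acc
    simp only [List.map_nil, PySem.Chars.split₀.go, pvToks]
    by_cases h : cur = [] <;> simp [h]
  | cons c rest ih =>
    intro cur acc
    simp only [List.map_cons, PySem.Chars.split₀.go, isspace_pvF]
    by_cases hs : pvSep c
    · simp only [pvToks, hs, if_true]
      by_cases hc : cur = []
      · subst hc
        simpa using ih [] acc
      · rw [if_neg (by simpa using hc), if_neg hc]
        have := ih [] (cur :: acc)
        simp only [List.reverse_nil, List.reverse_cons] at this ⊢
        rw [show (cur.reverse.reverse :: acc) = cur :: acc by simp, this]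
        simp
    · simp only [pvToks, hs, if_false, Bool.false_eq_true]
      have hfc : pvF c = c := by
        unfold pvF
        have : c ∉ pvDrop := by
          intro hmem
          exact hs (by unfold pvSep; simp [hmem])
        simp [this]
      rw [hfc, show (c :: cur.reverse) = (cur ++ [c]).reverse by simp, ih]

-- tokens are nonempty and contain no separator characters
lemma toks_wf : ∀ (l cur : List Char), (∀ c ∈ cur, pvSep c = false) →
    ∀ w ∈ pvToks l cur, w ≠ [] ∧ ∀ c ∈ w, pvSep c = false := by
  intro l
  induction l with
  | nil =>
    intro cur hcur w hw
    unfold pvToks at hw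
    by_cases h : cur = [] <;> simp [h] at hw
    subst hw; exact ⟨h, hcur⟩
  | cons c rest ih =>
    intro cur hcur w hw
    unfold pvToks at hw
    by_cases hs : pvSep c
    · rw [if_pos hs] at hw
      by_cases hc : cur = []
      · rw [if_pos hc] at hw; exact ih [] (by simp) w hw
      · rw [if_neg hc] at hw
        rcases (List.mem_cons.mp hw) with h | h
        · subst h; exact ⟨hc, hcur⟩
        · exact ih [] (by simp) w h
    · rw [if_neg hs] at hw
      refine ih (cur ++ [c]) ?_ w hw
      intro d hd
      rcases List.mem_append.mp hd with h | h
      · exact hcur d h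
      · simp at h; subst h; simpa using hs

-- B's scan produces exactly the kept tokens
lemma scan_toks : ∀ (l cur : List Char) (words : List String),
    pvScanB (l ++ [' ']) cur words
      = words ++ ((pvToks l cur).filter pvOk).map String.ofList := by
  intro l
  induction l with
  | nil =>
    intro cur words
    have hsp : (PySem.Set.contains pvSeps ' ' || PySem.Chars.isspace ' ') = true := by decide
    cases cur with
    | nil => simp [pvScanB, pvToks]
    | cons c0 cs =>
      simp only [List.nil_append, pvScanB, hsp, pvToks]
      rw [pvKeep_eq]
      by_cases h : c0 ∈ pvEntityPrefixes <;> simp [h, PySem.Set.contains, List.filter, pvOk]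
  | cons c rest ih =>
    intro cur words
    have hsep : (PySem.Set.contains pvSeps c || PySem.Chars.isspace c) = pvSep c := by
      unfold pvSep
      rw [pvSeps_eq]
      simp [PySem.Set.contains]
    simp only [List.cons_append, pvScanB, hsep, pvToks]
    by_cases hs : pvSep c
    · rw [if_pos hs, if_pos hs]
      cases cur with
      | nil => simp [ih]
      | cons c0 cs =>
        rw [if_neg (by simp), pvKeep_eq]
        by_cases h : c0 ∈ pvEntityPrefixes
        · simp [h, ih, List.filter, pvOk]
        · simp [h, ih, List.filter, pvOk]
    · rw [if_neg hs, if_neg hs, ih]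

-- strip is the identity on separator-free words
lemma strip_of_wf (w : List Char) (h : ∀ c ∈ w, pvSep c = false) :
    PySem.Chars.strip w = w := by
  have hns : ∀ c ∈ w, PySem.Chars.isspace c = false := by
    intro c hc
    have := h c hc
    unfold pvSep at this
    simp at this
    exact this.2
  have hd : ∀ (v : List Char), (∀ c ∈ v, PySem.Chars.isspace c = false) →
      v.dropWhile PySem.Chars.isspace = v := by
    intro v hv
    rw [List.dropWhile_eq_self_iff]
    intro hl
    simp [hv _ (List.getElem_mem hl)]
  unfold PySem.Chars.strip PySem.Chars.lstrip PySem.Chars.rstrip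
  rw [hd w hns, hd w.reverse (by intro c hc; exact hns c (List.mem_reverse.mp hc)), List.reverse_reverse]

set_option maxRecDepth 8192 in
set_option maxHeartbeats 1000000 in
theorem strip_all_entities_spec : Claim_equal_strip_all_entities := by
  intro text _
  unfold Spec_strip_all_entities strip_all_entities strip_all_entities_alt
  dsimp only
  rw [scan_toks]
  have hsplit : PySem.Str.split₀ (pvPunctuation.foldl (fun t sep =>
      if sep ∈ pvEntityPrefixes then t else PySem.Str.replace t (String.ofList [sep]) " ") text)
      = (pvToks text.toList []).map String.ofList := by
    have hX := strFold text
    simp only [PySem.Str.split₀, hX, PySem.Chars.split₀]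
    have h2 := split_go_toks text.toList [] []
    simp only [List.reverse_nil, List.nil_append] at h2
    rw [h2]
  rw [hsplit]
  simp only [List.nil_append]
  apply congrArg
  have hwf := toks_wf text.toList [] (by simp)
  have hcongr : ∀ (ws : List String), ∀ x ∈ (pvToks text.toList []).map String.ofList,
      (let word := PySem.Str.strip x
       if word ≠ "" then
         if ((PySem.Str.pyGet? word 0).getD ' ') ∉ pvEntityPrefixes then ws ++ [word] else ws
       else ws)
      = (if ((PySem.Str.pyGet? x 0).getD ' ') ∉ pvEntityPrefixes then ws ++ [x] else ws) := by
    intro ws x hx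
    rcases List.mem_map.mp hx with ⟨w, hw, rfl⟩
    obtain ⟨hne, hwfw⟩ := hwf w hw
    have hstrip : PySem.Str.strip (String.ofList w) = String.ofList w := by
      simp [PySem.Str.strip, strip_of_wf w hwfw]
    rw [hstrip]
    have hne' : String.ofList w ≠ "" := by
      intro h
      exact hne (by simpa using congrArg String.toList h)
    simp only [if_pos hne', ne_eq]
  rw [PySem.List.foldl_congr_mem _ _ _ _ (fun ws x hx => hcongr ws x hx),
    PySem.List.foldl_append_ite_eq_filter
      (p := fun x => ((PySem.Str.pyGet? x 0).getD ' ') ∉ pvEntityPrefixes), List.nil_append,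
    List.filter_map]
  apply congrArg
  apply List.filter_congr
  intro w hw
  obtain ⟨hne, hwfw⟩ := hwf w hw
  cases w with
  | nil => exact absurd rfl hne
  | cons c0 cs =>
    simp only [Function.comp, pvOk]
    have : PySem.Str.pyGet? (String.ofList (c0 :: cs)) 0 = some c0 := by
      simp [PySem.Str.pyGet?, PySem.List.pyGet?, PySem.List.pyIdx?]
    rw [this]
    rfl
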